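-- pv_equiv track=rewrite | github.com/cctbx/cctbx_project | iotbx/pdb/secondary_structure.py | filter_and_split_sheet_records
-- ===== SOURCE A (Python) =====
-- def filter_and_split_sheet_records(lines):
--   """Filter out only SHEET records and split them by sheet identifier.
--   returns [[lines with equal sheetID], ... ,[lines with equal sheetID]]
--   """
--   result = []
--   if lines is None:
--     return result
--   current_sh_lines = []
--   current_sh_id = ""
--   for line in lines:
--     if line.startswith("SHEET"):
--       line = "%-80s" % line # XXX: flex.split_lines strips each line
--       sheet_id = line[11:14]
--       if sheet_id == current_sh_id:
--         current_sh_lines.append(line)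
--       else:
--         if current_sh_lines != []:
--           result.append(current_sh_lines)
--           current_sh_lines = []
--         current_sh_lines = [line]
--         current_sh_id = sheet_id
--   if current_sh_lines != []:
--     result.append(current_sh_lines)
--   return result
-- ===== SOURCE B (Python) =====
-- def filter_and_split_sheet_records(lines):
--   """Filter out only SHEET records and split them by sheet identifier.
--   Builds the grouping back-to-front: walk the padded records in reverse,
--   prepending each record into the front group when its id matches."""
--   if lines is None:
--     return []
--   recs = ["%-80s" % line for line in lines if line.startswith("SHEET")]
--   groups = []
--   for r in reversed(recs):
--     if groups and groups[0][0][11:14] == r[11:14]: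
--       groups[0] = [r] + groups[0]
--     else:
--       groups = [[r]] + groups
--   return groups
-- ===== Notes on version B (the rewrite author's own statement) =====
-- stated objective: alternative
-- what changed: Instead of A's forward loop with current_sh_id/current_sh_lines accumulator state, B first filters and pads the SHEET records, then builds the grouping back-to-front by walking the records in reverse and prepending each into the front group (or opening a new front group), keeping no current-id state.
import Mathlib
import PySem

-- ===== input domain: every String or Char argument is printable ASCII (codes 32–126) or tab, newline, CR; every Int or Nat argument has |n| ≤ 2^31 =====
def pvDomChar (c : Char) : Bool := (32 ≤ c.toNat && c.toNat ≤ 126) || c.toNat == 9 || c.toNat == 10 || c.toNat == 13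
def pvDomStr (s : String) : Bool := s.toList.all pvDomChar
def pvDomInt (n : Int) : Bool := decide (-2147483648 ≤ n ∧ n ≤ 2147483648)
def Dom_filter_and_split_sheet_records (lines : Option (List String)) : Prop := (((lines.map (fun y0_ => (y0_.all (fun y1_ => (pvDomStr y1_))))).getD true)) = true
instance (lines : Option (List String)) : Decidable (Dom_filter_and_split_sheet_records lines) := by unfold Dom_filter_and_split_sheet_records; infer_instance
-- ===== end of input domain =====

-- B drops A's current_sh_id/current_sh_lines accumulator: it filters and pads the SHEET
-- records, then builds the grouping back-to-front by a reverse walk that prepends each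
-- record into the front group (or opens a new one); alternative decomposition, same cost class.

-- ===== PORT A =====
-- "%-80s" % line : left-justify-pad with spaces to width 80 (exact for strings)
def pvPad80 (s : String) : String :=
  String.ofList (s.toList ++ List.replicate (80 - s.toList.length) ' ')

-- loop state: (result, current_sh_lines, current_sh_id); the id "" / line[11:14] is kept as List Char
def pvStepA (st : List (List String) × List String × List Char) (line : String) :
    List (List String) × List String × List Char :=
  if PySem.Str.startswith line "SHEET" then
    let L := pvPad80 line
    let sheet_id := PySem.List.slice L.toList (some 11) (some 14)
    if sheet_id == st.2.2 then (st.1, st.2.1 ++ [L], st.2.2)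
    else ((if st.2.1 ≠ [] then st.1 ++ [st.2.1] else st.1), [L], sheet_id)
  else st

def filter_and_split_sheet_records (lines : Option (List String)) : List (List String) :=
  match lines with
  | none => []
  | some ls =>
    let st := ls.foldl pvStepA ([], [], [])
    if st.2.1 ≠ [] then st.1 ++ [st.2.1] else st.1

-- ===== PORT B =====
-- l[11:14]
def pvKey (s : String) : List Char := PySem.List.slice s.toList (some 11) (some 14)

-- groups[0][0][11:14], with [] for the never-occurring empty cases
def pvKeyOf (g : List String) : List Char :=
  match g with
  | [] => []
  | x :: _ => pvKey x

-- body of B's reverse loop: prepend r into the front group or open a new front group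
def pvStepB (groups : List (List String)) (r : String) : List (List String) :=
  match groups with
  | [] => [[r]]
  | g :: gs => if pvKeyOf g == pvKey r then ([r] ++ g) :: gs else [r] :: g :: gs

def filter_and_split_sheet_records_alt (lines : Option (List String)) : List (List String) :=
  match lines with
  | none => []
  | some ls =>
    let recs := (ls.filter (fun l => PySem.Str.startswith l "SHEET")).map pvPad80
    recs.reverse.foldl pvStepB []

-- ===== PRECONDITION & SPEC =====
def Spec_filter_and_split_sheet_records (lines : Option (List String)) (out : List (List String)) : Prop := out = filter_and_split_sheet_records_alt lines
instance (lines : Option (List String)) (out : List (List String)) : Decidable (Spec_filter_and_split_sheet_records lines out) := by unfold Spec_filter_and_split_sheet_records; infer_instance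

-- ===== CLAIM (what is proved, stated in full; the proofs are below) =====
def Claim_equal_filter_and_split_sheet_records : Prop := ∀ (lines : Option (List String)), Dom_filter_and_split_sheet_records lines → Spec_filter_and_split_sheet_records lines (filter_and_split_sheet_records lines)

-- ===== LEMMAS AND PROOFS =====

-- structural (foldr) view of B's reverse loop, used only by the proofs
def pvGroupBy : List String → List (List String)
  | [] => []
  | y :: ys => pvStepB (pvGroupBy ys) y

lemma altFold_eq_groupBy (recs : List String) :
    recs.reverse.foldl pvStepB [] = pvGroupBy recs := by
  induction recs with
  | nil => rfl
  | cons y ys ih => simp [List.foldl_append, ih, pvGroupBy]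

-- step over only the padded SHEET lines
def pvStepG (st : List (List String) × List String × List Char) (L : String) :
    List (List String) × List String × List Char :=
  if pvKey L == st.2.2 then (st.1, st.2.1 ++ [L], st.2.2)
  else ((if st.2.1 ≠ [] then st.1 ++ [st.2.1] else st.1), [L], pvKey L)

def pvFinish (st : List (List String) × List String × List Char) : List (List String) :=
  if st.2.1 ≠ [] then st.1 ++ [st.2.1] else st.1

lemma foldA_eq_foldG (ls : List String) (st : List (List String) × List String × List Char) :
    ls.foldl pvStepA st =
      ((ls.filter (fun l => PySem.Str.startswith l "SHEET")).map pvPad80).foldl pvStepG st := by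
  induction ls generalizing st with
  | nil => rfl
  | cons x xs ih =>
    have stepA_eq : pvStepA st x =
        if PySem.Str.startswith x "SHEET" then pvStepG st (pvPad80 x) else st := rfl
    rw [List.foldl_cons, stepA_eq, List.filter_cons]
    by_cases h : PySem.Str.startswith x "SHEET" = true
    · rw [if_pos h, if_pos h, List.map_cons, List.foldl_cons, ih]
    · rw [if_neg h, if_neg h, ih]

-- glue form of pvGroupBy's cons case (proof-side helper)
def pvGlue (id : List Char) (cur : List String) (gs : List (List String)) : List (List String) :=
  match gs with
  | [] => [cur]
  | g :: gs' => if pvKeyOf g == id then (cur ++ g) :: gs' else cur :: g :: gs'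

lemma groupBy_cons_eq_glue (y : String) (ys : List String) :
    pvGroupBy (y :: ys) = pvGlue (pvKey y) [y] (pvGroupBy ys) := by
  cases h : pvGroupBy ys with
  | nil => simp [pvGroupBy, h, pvStepB, pvGlue]
  | cons g gs =>
    by_cases hg : pvKeyOf g == pvKey y
    · simp [pvGroupBy, h, pvStepB, pvGlue, hg]
    · simp [pvGroupBy, h, pvStepB, pvGlue, hg]

lemma glue_head_key (k : List Char) (y : String) (gs : List (List String)) :
    ∃ g' gs', pvGlue k [y] gs = g' :: gs' ∧ pvKeyOf g' = pvKey y := by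
  cases gs with
  | nil => exact ⟨[y], [], by simp [pvGlue], by simp [pvKeyOf]⟩
  | cons g gs' =>
    by_cases hg : pvKeyOf g == k
    · exact ⟨[y] ++ g, gs', by simp [pvGlue, hg], by simp [pvKeyOf]⟩
    · exact ⟨[y], g :: gs', by simp [pvGlue, hg], by simp [pvKeyOf]⟩

lemma loop_glue (ys : List String) (res : List (List String)) (cur : List String)
    (id : List Char) (hcur : cur ≠ []) :
    pvFinish (ys.foldl pvStepG (res, cur, id)) = res ++ pvGlue id cur (pvGroupBy ys) := by
  induction ys generalizing res cur id with
  | nil => simp [pvFinish, hcur, pvGroupBy, pvGlue]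
  | cons y ys ih =>
    rw [List.foldl_cons, groupBy_cons_eq_glue]
    by_cases hk : pvKey y == id
    · have hk' : pvKey y = id := by simpa using hk
      subst hk'
      have step : pvStepG (res, cur, pvKey y) y = (res, cur ++ [y], pvKey y) := by
        simp [pvStepG]
      rw [step, ih res (cur ++ [y]) (pvKey y) (by simp)]
      congr 1
      cases h : pvGroupBy ys with
      | nil => simp [pvGlue, pvKeyOf]
      | cons g gs =>
        cases g with
        | nil =>
          by_cases hid : pvKey y = [] <;> simp [pvGlue, pvKeyOf, hid]
        | cons a g' =>
          by_cases hg : pvKey a = pvKey y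
          · simp [pvGlue, pvKeyOf, hg]
          · simp [pvGlue, pvKeyOf, hg]
    · have hk' : ¬ pvKey y = id := by simpa using hk
      have step : pvStepG (res, cur, id) y = (res ++ [cur], [y], pvKey y) := by
        simp [pvStepG, hk, hcur]
      rw [step, ih (res ++ [cur]) [y] (pvKey y) (by simp)]
      obtain ⟨g', gs', heq, hkey⟩ := glue_head_key (pvKey y) y (pvGroupBy ys)
      rw [heq]
      have : pvGlue id cur (g' :: gs') = cur :: g' :: gs' := by
        simp [pvGlue, hkey, hk']
      rw [this]
      simp

lemma pvKey_pad_ne (s : String) : pvKey (pvPad80 s) ≠ [] := by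
  have hlen : (pvPad80 s).toList.length = s.toList.length + (80 - s.toList.length) := by
    simp [pvPad80]
  have h3 : (pvKey (pvPad80 s)).length = 3 := by
    rw [pvKey, PySem.List.slice_toNat _ (by norm_num) (by norm_num)]
    simp only [List.length_take, List.length_drop, hlen]
    omega
  intro h
  rw [h] at h3
  simp at h3

lemma finish_fold (ys : List String) (h : ∀ y ∈ ys, pvKey y ≠ []) :
    pvFinish (ys.foldl pvStepG ([], [], [])) = pvGroupBy ys := by
  cases ys with
  | nil => rfl
  | cons y ys =>
    rw [List.foldl_cons]
    have hy : ¬ (pvKey y == ([] : List Char)) := by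
      simpa using h y (by simp)
    have step : pvStepG ([], [], []) y = ([], [y], pvKey y) := by
      simp [pvStepG, hy]
    rw [step, loop_glue ys [] [y] (pvKey y) (by simp), groupBy_cons_eq_glue]
    simp

-- ===== VERDICT (by name: the statement is the Claim_ definition above) =====
theorem filter_and_split_sheet_records_spec : Claim_equal_filter_and_split_sheet_records := by
  intro lines _
  unfold Spec_filter_and_split_sheet_records filter_and_split_sheet_records
    filter_and_split_sheet_records_alt
  cases lines with
  | none => rfl
  | some ls =>
    simp only []
    rw [foldA_eq_foldG, altFold_eq_groupBy]
    exact finish_fold _ (by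
      intro y hy
      obtain ⟨x, -, rfl⟩ := List.mem_map.mp hy
      exact pvKey_pad_ne x)
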